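-- pv_equiv track=rewrite | github.com/ludia8888/Icon-Blaster | ontology-management-service/middleware/issue_tracking_middleware.py | _extract_branch_name
-- ===== SOURCE A (Python) =====
-- def _extract_branch_name(path: str) -> str:
--     """Extract branch name from path"""
--     parts = path.split("/")
--
--     # Look for common patterns
--     for i, part in enumerate(parts):
--         if part == "schemas" and i + 1 < len(parts):  # Fixed: schemas not schema
--             return parts[i + 1]
--         elif part == "branches" and i + 1 < len(parts):
--             return parts[i + 1]
--
--     return "unknown"
-- ===== SOURCE B (Python) =====
-- def _head_segment(s: str) -> str:
--     k = s.find("/")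
--     return s if k == -1 else s[:k]
--
--
-- def _extract_branch_name(path: str) -> str:
--     """Extract branch name from path"""
--     while True:
--         if path.startswith("schemas/"):
--             return _head_segment(path[len("schemas/"):])
--         if path.startswith("branches/"):
--             return _head_segment(path[len("branches/"):])
--         k = path.find("/")
--         if k == -1:
--             return "unknown"
--         path = path[k + 1:]
-- ===== Notes on version B (the rewrite author's own statement) =====
-- stated objective: alternative
-- what changed: B never splits the path into a list: it works on the raw string, testing for a 'schemas/' or 'branches/' prefix and otherwise discarding everything up to and including the first '/', then slices the answer out up to the next '/', so no part list, no enumerate and no index arithmetic exist.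
import Mathlib
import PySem

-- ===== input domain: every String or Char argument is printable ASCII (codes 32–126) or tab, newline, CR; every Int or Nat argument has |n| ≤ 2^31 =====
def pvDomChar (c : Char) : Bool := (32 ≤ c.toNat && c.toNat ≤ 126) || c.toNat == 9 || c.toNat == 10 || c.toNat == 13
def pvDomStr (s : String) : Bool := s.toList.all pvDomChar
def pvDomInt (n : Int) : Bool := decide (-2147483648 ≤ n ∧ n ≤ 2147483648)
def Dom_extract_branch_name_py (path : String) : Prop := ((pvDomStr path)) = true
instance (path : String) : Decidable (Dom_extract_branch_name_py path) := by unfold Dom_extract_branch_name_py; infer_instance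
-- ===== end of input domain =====

-- B never splits the path into a part list: it scans the raw string, testing for a
-- "schemas/"/"branches/" prefix and otherwise dropping through the first '/';
-- objective: alternative (same O(n) cost, no list of parts, no index arithmetic).

-- ===== PORT A =====
-- the 'for i, part in enumerate(parts)' loop with early return
def pvAGo (parts : List String) : List (Int × String) → String
  | [] => "unknown"
  | (i, part) :: rest =>
    if part == "schemas" && decide (i + 1 < (parts.length : Int)) then
      PySem.List.pyGetD parts (i + 1) ""   -- guarded by i+1 < len, so exact (never the default)
    else if part == "branches" && decide (i + 1 < (parts.length : Int)) then
      PySem.List.pyGetD parts (i + 1) ""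
    else
      pvAGo parts rest

def extract_branch_name_py (path : String) : String :=
  let parts := (PySem.Str.split? path "/").getD []   -- "/" ≠ "", so split? is always some: exact
  pvAGo parts (PySem.List.enumerate parts)

-- ===== PORT B =====
-- _head_segment(s): k = s.find("/"); return s if k == -1 else s[:k]
def pvHeadSeg (s : List Char) : List Char :=
  let k := PySem.Chars.find s "/".toList
  if k = -1 then s else PySem.Chars.slice s none (some k)

-- the 'while True' loop of Source B as tail recursion on the remaining path
def pvBGo (cs : List Char) : String :=
  if PySem.Chars.startswith cs "schemas/".toList then
    String.ofList (pvHeadSeg (PySem.Chars.slice cs (some 8) none))   -- path[len("schemas/"):]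
  else if PySem.Chars.startswith cs "branches/".toList then
    String.ofList (pvHeadSeg (PySem.Chars.slice cs (some 9) none))   -- path[len("branches/"):]
  else if hk : PySem.Chars.find cs "/".toList = -1 then
    "unknown"
  else
    pvBGo (PySem.Chars.slice cs (some (PySem.Chars.find cs "/".toList + 1)) none)   -- path[k+1:]
termination_by cs.length
decreasing_by
  have hinf : "/".toList <:+: cs := (PySem.Chars.find_ne_neg_one_iff cs _).mp hk
  have h0 : 0 ≤ PySem.Chars.find cs "/".toList := (PySem.Chars.find_nonneg_iff cs _).mpr hinf
  have hle : PySem.Chars.find cs "/".toList ≤ (cs.length : Int) := PySem.Chars.find_le_length cs _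
  have hne : cs ≠ [] := by
    rintro rfl
    simp [List.infix_nil] at hinf
  have hlen : 0 < cs.length := List.length_pos_iff.mpr hne
  have : PySem.Chars.slice cs (some (PySem.Chars.find cs "/".toList + 1)) none
      = cs.drop (PySem.Chars.find cs "/".toList + 1).toNat := by
    simp only [PySem.Chars.slice_eq_listSlice]
    exact PySem.List.slice_from cs (by omega)
  rw [this]
  simp only [List.length_drop]
  omega

def extract_branch_name_py_alt (path : String) : String :=
  pvBGo path.toList

-- ===== PRECONDITION & SPEC =====
def Spec_extract_branch_name_py (path : String) (out : String) : Prop := out = extract_branch_name_py_alt path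
instance (path : String) (out : String) : Decidable (Spec_extract_branch_name_py path out) := by unfold Spec_extract_branch_name_py; infer_instance

-- ===== CLAIM (what is proved, stated in full; the proofs are below) =====
def Claim_equal_extract_branch_name_py : Prop := ∀ (path : String), Dom_extract_branch_name_py path → Spec_extract_branch_name_py path (extract_branch_name_py path)

-- ===== LEMMAS AND PROOFS =====

-- proof device: first segment before the first '/', and the remaining segments
def pvP : List Char → List Char × List (List Char)
  | [] => ([], [])
  | c :: rest =>
    let q := pvP rest
    if c = '/' then ([], q.1 :: q.2) else (c :: q.1, q.2)

-- first-match lookup over consecutive pairs: the common value both ports reach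
def pvFindZip (parts : List String) : String :=
  match (parts.zip parts.tail).find? (fun p => p.1 == "schemas" || p.1 == "branches") with
  | some p => p.2
  | none => "unknown"

theorem pvAGo_eq_find (parts : List String) :
    ∀ (l : List String) (k : Nat), parts.drop k = l →
    pvAGo parts (PySem.List.enumerate l k) = pvFindZip l := by
  intro l
  induction l with
  | nil => intro k _; simp [PySem.List.enumerate, pvAGo, pvFindZip]
  | cons a rest ih =>
    intro k hdrop
    have hlen : rest.length = parts.length - k - 1 := by
      have := congrArg List.length hdrop
      simp at this; omega
    have hk : k < parts.length := by
      have := congrArg List.length hdrop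
      simp at this; omega
    rw [PySem.List.enumerate_cons]
    cases rest with
    | nil =>
      have hbound : ¬ ((k : Int) + 1 < (parts.length : Int)) := by
        simp at hlen; omega
      simp [pvAGo, hbound, PySem.List.enumerate, pvFindZip]
    | cons b rest' =>
      have hbound : ((k : Int) + 1 < (parts.length : Int)) := by
        simp at hlen; omega
      have hget : PySem.List.pyGetD parts ((k : Int) + 1) "" = b := by
        have hcast : ((k : Int) + 1) = ((k + 1 : Nat) : Int) := by push_cast; ring
        rw [hcast, PySem.List.pyGetD_natCast]
        have h1 : parts[k + 1]? = some b := by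
          have hd : (parts.drop k)[1]? = some b := by rw [hdrop]; rfl
          rw [List.getElem?_drop] at hd
          simpa using hd
        simp [List.getD, h1]
      have hdrop' : parts.drop (k + 1) = b :: rest' := by
        have : parts.drop (k + 1) = (parts.drop k).drop 1 := by
          rw [List.drop_drop]
        rw [this, hdrop]; rfl
      by_cases ha : a = "schemas" ∨ a = "branches"
      · have : pvFindZip (a :: b :: rest') = b := by
          rcases ha with h | h <;> simp [pvFindZip, h]
        rw [this]
        rcases ha with h | h <;> simp [pvAGo, h, hbound, hget]
      · rw [not_or] at ha
        have hfz : pvFindZip (a :: b :: rest') = pvFindZip (b :: rest') := by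
          simp [pvFindZip, ha.1, ha.2]
        rw [hfz]
        have ihr := ih (k + 1) hdrop'
        rw [PySem.List.enumerate_cons] at ihr
        push_cast at ihr
        simp only [pvAGo]
        rw [if_neg (by simp [ha.1]), if_neg (by simp [ha.2])]
        simpa using ihr

-- characterisation of PySem's fuelled split on the single-char separator "/"
theorem pvSplitGo_P : ∀ (fuel : Nat) (l cur : List Char) (acc : List (List Char)),
    l.length < fuel →
    PySem.Chars.splitOn.go "/".toList fuel l cur acc
      = acc.reverse ++ (cur.reverse ++ (pvP l).1) :: (pvP l).2 := by
  intro fuel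
  induction fuel with
  | zero => intro l cur acc h; omega
  | succ n ih =>
    intro l cur acc h
    cases l with
    | nil => simp [PySem.Chars.splitOn.go, pvP]
    | cons c rest =>
      by_cases hc : c = '/'
      · subst hc
        rw [show PySem.Chars.splitOn.go "/".toList (n+1) ('/' :: rest) cur acc
              = PySem.Chars.splitOn.go "/".toList n rest [] (cur.reverse :: acc) from by
            simp [PySem.Chars.splitOn.go, List.isPrefixOf]]
        rw [ih rest [] (cur.reverse :: acc) (by simp at h; omega)]
        simp [pvP]
      · rw [show PySem.Chars.splitOn.go "/".toList (n+1) (c :: rest) cur acc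
              = PySem.Chars.splitOn.go "/".toList n rest (c :: cur) acc from by
            simp only [PySem.Chars.splitOn.go]
            rw [if_neg (by simp [Ne.symm hc])]]
        rw [ih rest (c :: cur) acc (by simp at h; omega)]
        simp [pvP, hc]

theorem pvSplitOn_P (cs : List Char) :
    PySem.Chars.splitOn cs "/".toList = (pvP cs).1 :: (pvP cs).2 := by
  unfold PySem.Chars.splitOn
  rw [pvSplitGo_P (cs.length + 1) cs [] [] (by omega)]
  simp

theorem pvFindGo_P : ∀ (t : List Char) (k : Nat),
    PySem.Chars.find.go "/".toList t k
      = if (pvP t).2 = [] then -1 else (k : Int) + (pvP t).1.length := by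
  intro t
  induction t with
  | nil => intro k; simp [PySem.Chars.find.go, pvP]
  | cons c rest ih =>
    intro k
    by_cases hc : c = '/'
    · subst hc
      simp [PySem.Chars.find.go, List.isPrefixOf, pvP]
    · rw [show PySem.Chars.find.go "/".toList (c :: rest) k
            = PySem.Chars.find.go "/".toList rest (k + 1) from by
          simp only [PySem.Chars.find.go]
          rw [if_neg (by simp [Ne.symm hc])]]
      rw [ih (k + 1)]
      by_cases h2 : (pvP rest).2 = []
      · simp [pvP, hc, h2]
      · simp [pvP, hc, h2]; ring

theorem pvFind_P (t : List Char) :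
    PySem.Chars.find t "/".toList
      = if (pvP t).2 = [] then -1 else ((pvP t).1.length : Int) := by
  unfold PySem.Chars.find
  rw [pvFindGo_P t 0]
  simp

theorem pvP1_prefix : ∀ (t : List Char), (pvP t).1 <+: t := by
  intro t
  induction t with
  | nil => simp [pvP]
  | cons c rest ih =>
    by_cases hc : c = '/' <;> simp [pvP, hc]
    exact ih

theorem pvP2_nil : ∀ (t : List Char), (pvP t).2 = [] → (pvP t).1 = t := by
  intro t
  induction t with
  | nil => intro _; simp [pvP]
  | cons c rest ih =>
    intro h
    by_cases hc : c = '/'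
    · simp [pvP, hc] at h
    · simp [pvP, hc] at h ⊢
      exact ih h

theorem pvP_decomp : ∀ (t : List Char), (pvP t).2 ≠ [] →
    t = (pvP t).1 ++ '/' :: t.drop ((pvP t).1.length + 1) := by
  intro t
  induction t with
  | nil => intro h; simp [pvP] at h
  | cons c rest ih =>
    intro h
    by_cases hc : c = '/'
    · subst hc; simp [pvP]
    · simp only [pvP, if_neg hc] at h ⊢
      have := ih h
      simpa using congrArg (c :: ·) this

theorem pvP_drop : ∀ (t : List Char) (s : List Char) (ss : List (List Char)),
    (pvP t).2 = s :: ss → pvP (t.drop ((pvP t).1.length + 1)) = (s, ss) := by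
  intro t
  induction t with
  | nil => intro s ss h; simp [pvP] at h
  | cons c rest ih =>
    intro s ss h
    by_cases hc : c = '/'
    · subst hc
      simp only [pvP] at h ⊢
      simp at h
      simp [← h.1, ← h.2]
    · simp only [pvP, if_neg hc] at h ⊢
      simpa using ih s ss h

theorem pvHeadSeg_P (t : List Char) : pvHeadSeg t = (pvP t).1 := by
  unfold pvHeadSeg
  rw [pvFind_P]
  by_cases h2 : (pvP t).2 = []
  · simp [h2, pvP2_nil t h2]
  · rw [if_neg h2, if_neg (by omega)]
    simp only [PySem.Chars.slice_eq_listSlice]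
    rw [PySem.List.slice_to_natCast]
    exact ((List.prefix_iff_eq_take).mp (pvP1_prefix t)).symm

theorem pvFindZip_cons (a b : String) (rest : List String)
    (h1 : a ≠ "schemas") (h2 : a ≠ "branches") :
    pvFindZip (a :: b :: rest) = pvFindZip (b :: rest) := by
  simp [pvFindZip, h1, h2]

theorem pvBGo_eq (cs : List Char) :
    pvBGo cs = pvFindZip (((pvP cs).1 :: (pvP cs).2).map (fun l => String.ofList l)) := by
  induction cs using pvBGo.induct with
  | case1 cs h =>
    rw [pvBGo]
    rw [if_pos h]
    obtain ⟨t, rfl⟩ := (PySem.Chars.startswith_iff _ _).mp h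
    have hP : pvP ("schemas/".toList ++ t) = ("schemas".toList, (pvP t).1 :: (pvP t).2) := by
      show pvP ('s' :: 'c' :: 'h' :: 'e' :: 'm' :: 'a' :: 's' :: '/' :: t) = _
      simp [pvP]
    have hsl : PySem.Chars.slice ("schemas/".toList ++ t) (some 8) none = t := by
      simp only [PySem.Chars.slice_eq_listSlice]
      rw [show (8 : Int) = ((8 : Nat) : Int) from rfl, PySem.List.slice_from_natCast]
      simp
    rw [hsl, pvHeadSeg_P, hP]
    simp [pvFindZip]
  | case2 cs h1 h =>
    rw [pvBGo]
    rw [if_neg h1, if_pos h]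
    obtain ⟨t, rfl⟩ := (PySem.Chars.startswith_iff _ _).mp h
    have hP : pvP ("branches/".toList ++ t) = ("branches".toList, (pvP t).1 :: (pvP t).2) := by
      show pvP ('b' :: 'r' :: 'a' :: 'n' :: 'c' :: 'h' :: 'e' :: 's' :: '/' :: t) = _
      simp [pvP]
    have hsl : PySem.Chars.slice ("branches/".toList ++ t) (some 9) none = t := by
      simp only [PySem.Chars.slice_eq_listSlice]
      rw [show (9 : Int) = ((9 : Nat) : Int) from rfl, PySem.List.slice_from_natCast]
      simp
    rw [hsl, pvHeadSeg_P, hP]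
    simp [pvFindZip]
  | case3 cs h1 h2 hk =>
    rw [pvBGo]
    rw [if_neg h1, if_neg h2, dif_pos hk]
    rw [pvFind_P] at hk
    have h2nil : (pvP cs).2 = [] := by
      by_contra hne
      rw [if_neg hne] at hk
      omega
    simp [h2nil, pvFindZip]
  | case4 cs h1 h2 hk ih =>
    rw [pvBGo]
    rw [if_neg h1, if_neg h2, dif_neg hk]
    have hfind := pvFind_P cs
    have h2ne : (pvP cs).2 ≠ [] := by
      intro hnil
      rw [hfind, if_pos hnil] at hk
      exact hk rfl
    obtain ⟨s, ss, h2eq⟩ : ∃ s ss, (pvP cs).2 = s :: ss := by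
      cases hx : (pvP cs).2 with
      | nil => exact absurd hx h2ne
      | cons s ss => exact ⟨s, ss, rfl⟩
    have hkval : PySem.Chars.find cs "/".toList = ((pvP cs).1.length : Int) := by
      rw [hfind, if_neg h2ne]
    have hsl : PySem.Chars.slice cs (some (PySem.Chars.find cs "/".toList + 1)) none
        = cs.drop ((pvP cs).1.length + 1) := by
      simp only [PySem.Chars.slice_eq_listSlice]
      rw [hkval, show ((pvP cs).1.length : Int) + 1 = (((pvP cs).1.length + 1 : Nat) : Int) from by
        push_cast; ring, PySem.List.slice_from_natCast]
    rw [hsl] at ih ⊢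
    rw [ih, pvP_drop cs s ss h2eq]
    have hA : String.ofList (pvP cs).1 ≠ "schemas" := by
      intro habs
      have hps : (pvP cs).1 = "schemas".toList := by
        rw [← habs]; simp
      have heq : "schemas/".toList ++ cs.drop ((pvP cs).1.length + 1) = cs := by
        conv_rhs => rw [pvP_decomp cs h2ne]
        rw [hps]
        simp
      exact h1 ((PySem.Chars.startswith_iff _ _).mpr ⟨cs.drop ((pvP cs).1.length + 1), heq⟩)
    have hB : String.ofList (pvP cs).1 ≠ "branches" := by
      intro habs
      have hps : (pvP cs).1 = "branches".toList := by
        rw [← habs]; simp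
      have heq : "branches/".toList ++ cs.drop ((pvP cs).1.length + 1) = cs := by
        conv_rhs => rw [pvP_decomp cs h2ne]
        rw [hps]
        simp
      exact h2 ((PySem.Chars.startswith_iff _ _).mpr ⟨cs.drop ((pvP cs).1.length + 1), heq⟩)
    rw [h2eq]
    simp only [List.map_cons]
    rw [pvFindZip_cons _ _ _ hA hB]

-- ===== VERDICT (by name: the statement is the Claim_ definition above) =====
theorem extract_branch_name_py_spec : Claim_equal_extract_branch_name_py := by
  intro path _
  unfold Spec_extract_branch_name_py extract_branch_name_py extract_branch_name_py_alt
  have hsplit : (PySem.Str.split? path "/").getD []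
      = (((pvP path.toList).1 :: (pvP path.toList).2).map (fun l => String.ofList l)) := by
    have h0 := PySem.Str.split?_map path "/"
    cases hsp : PySem.Str.split? path "/" with
    | none => rw [hsp] at h0; simp [PySem.Chars.split?] at h0
    | some parts =>
      rw [hsp] at h0
      simp only [PySem.Chars.split?, Option.map_some, if_neg (by decide : ¬ ("/".toList.isEmpty = true)), Option.some_inj] at h0
      have hparts : parts = (PySem.Chars.splitOn path.toList "/".toList).map String.ofList := by
        rw [← h0, List.map_map]
        simp [Function.comp_def]
      rw [Option.getD_some, hparts, pvSplitOn_P path.toList]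
  simp only [hsplit]
  have h := pvAGo_eq_find
    (((pvP path.toList).1 :: (pvP path.toList).2).map (fun l => String.ofList l))
    (((pvP path.toList).1 :: (pvP path.toList).2).map (fun l => String.ofList l)) 0 rfl
  simp only [Nat.cast_zero] at h
  rw [h, pvBGo_eq path.toList]
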